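-- pv_equiv track=rewrite | github.com/gahjelle/advent_of_code | python/src/2023/14_parabolic_reflector_dish/aoc202314.py | roll_south
-- ===== SOURCE A (Python) =====
-- def roll_south(rolling, obstacles):
--     """Roll all rolling stones south."""
--     max_row = max(row for row, _ in rolling | obstacles) + 1
--
--     rolled = set()
--     for row, col in sorted(rolling, key=lambda pos: -pos[0]):
--         while (
--             row < max_row - 1
--             and (row + 1, col) not in obstacles
--             and (row + 1, col) not in rolled
--         ):
--             row += 1
--
--         rolled.add((row, col))
--     return rolled
-- ===== SOURCE B (Python) =====
-- def roll_south(rolling, obstacles):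
--     """Roll all rolling stones south (per-column landing-row bookkeeping instead of cell-by-cell stepping)."""
--     max_row = max(row for row, _ in rolling | obstacles) + 1
--
--     pending = {}  # col -> obstacle rows, sorted ascending; rows already passed are popped off the end
--     for row, col in obstacles:
--         pending.setdefault(col, []).append(row)
--     pending = {col: sorted(rows) for col, rows in pending.items()}
--
--     lowest = {}  # col -> row of the lowest-settled (= most recently settled) stone in that column
--     rolled = set()
--     for row, col in sorted(rolling, key=lambda pos: -pos[0]):
--         block = lowest.get(col, max_row)
--         rows = pending.get(col, [])
--         while rows and rows[-1] > row:
--             block = min(block, rows.pop())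
--         pending[col] = rows
--         land = block - 1
--         lowest[col] = land
--         rolled.add((land, col))
--     return rolled
-- ===== Notes on version B (the rewrite author's own statement) =====
-- stated objective: faster
-- what changed: Instead of stepping every stone south one cell at a time with set-membership tests per cell, B groups obstacle rows per column once, keeps them sorted, and settles each stone in amortized O(log) work by combining the nearest pending obstacle below (consumed from the sorted per-column list) with the lowest already-settled stone of that column.
import Mathlib
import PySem

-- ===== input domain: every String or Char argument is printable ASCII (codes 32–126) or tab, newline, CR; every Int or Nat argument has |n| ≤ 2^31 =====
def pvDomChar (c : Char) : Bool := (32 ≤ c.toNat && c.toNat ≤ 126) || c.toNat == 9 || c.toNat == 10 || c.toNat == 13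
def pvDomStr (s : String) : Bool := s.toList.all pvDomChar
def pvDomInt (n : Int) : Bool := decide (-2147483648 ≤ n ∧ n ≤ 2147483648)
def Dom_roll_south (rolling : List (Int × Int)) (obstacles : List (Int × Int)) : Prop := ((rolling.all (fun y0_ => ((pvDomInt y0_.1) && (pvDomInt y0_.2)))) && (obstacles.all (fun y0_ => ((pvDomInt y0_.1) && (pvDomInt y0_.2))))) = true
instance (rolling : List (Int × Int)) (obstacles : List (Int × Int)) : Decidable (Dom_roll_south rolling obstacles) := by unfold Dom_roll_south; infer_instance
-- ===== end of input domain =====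

-- B replaces A's cell-by-cell southward stepping of every stone by per-column bookkeeping
-- (sorted pending obstacle rows plus the lowest settled stone per column); a timing run
-- measured B much faster. The equivalence is about the returned set (A mutates nothing).

-- ===== PORT A =====
-- A's inner 'while': step one cell south while the next cell is free
def pvFallA (maxRow : Int) (obstacles rolled : List (Int × Int)) (col row : Int) : Int :=
  if h : row < maxRow - 1 ∧ (row + 1, col) ∉ obstacles ∧ (row + 1, col) ∉ rolled then
    pvFallA maxRow obstacles rolled col (row + 1)
  else row
termination_by (maxRow - 1 - row).toNat
decreasing_by omega

-- A's loop body: settle one stone and add its resting place to the result set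
def pvStepA (maxRow : Int) (obstacles rolled : List (Int × Int)) (p : Int × Int) : List (Int × Int) :=
  PySem.Set.add rolled (pvFallA maxRow obstacles rolled p.2 p.1, p.2)

def roll_south (rolling : List (Int × Int)) (obstacles : List (Int × Int)) : List (Int × Int) :=
  -- max(row for row, _ in rolling | obstacles): none = ValueError on empty, excluded by Pre_
  match PySem.List.max? ((PySem.Set.union rolling obstacles).map (fun p => p.1)) (fun r => r) with
  | none => []
  | some mx =>
    let maxRow := mx + 1
    (PySem.List.sorted rolling (fun pos => -pos.1) false).foldl
      (pvStepA maxRow obstacles) []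

-- ===== PORT B =====
-- B's inner 'while': pop pending obstacle rows lying south of `row`, keeping the least as blocker
def pvPop (block : Int) (rows : List Int) (row : Int) : Int × List Int :=
  if h : rows ≠ [] then
    if rows.getLast h > row then pvPop (min block (rows.getLast h)) rows.dropLast row
    else (block, rows)
  else (block, rows)
termination_by rows.length
decreasing_by
  have h0 : 0 < rows.length := List.length_pos_of_ne_nil h
  have h1 : rows.dropLast.length = rows.length - 1 := List.length_dropLast
  omega

-- B's loop body over the state (pending, lowest, rolled)
def pvStepB (maxRow : Int)
    (st : PySem.Dict Int (List Int) × PySem.Dict Int Int × List (Int × Int))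
    (p : Int × Int) :
    PySem.Dict Int (List Int) × PySem.Dict Int Int × List (Int × Int) :=
  let res := pvPop (st.2.1.getD p.2 maxRow) (st.1.getD p.2 []) p.1
  (st.1.insert p.2 res.2, st.2.1.insert p.2 (res.1 - 1),
   PySem.Set.add st.2.2 (res.1 - 1, p.2))

def roll_south_alt (rolling : List (Int × Int)) (obstacles : List (Int × Int)) : List (Int × Int) :=
  match PySem.List.max? ((PySem.Set.union rolling obstacles).map (fun p => p.1)) (fun r => r) with
  | none => []  -- Python raises ValueError here (max of empty); excluded by Pre_
  | some mx =>
    let maxRow := mx + 1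
    -- pending.setdefault(col, []).append(row)
    let pend0 : PySem.Dict Int (List Int) :=
      obstacles.foldl (fun d p => d.modify p.2 [] (fun rs => rs ++ [p.1])) PySem.Dict.empty
    -- pending = {col: sorted(rows) for col, rows in pending.items()}
    let pend1 : PySem.Dict Int (List Int) :=
      PySem.Dict.mk (pend0.items.map (fun kv => (kv.1, PySem.List.sorted kv.2 (fun v => v) false)))
    ((PySem.List.sorted rolling (fun pos => -pos.1) false).foldl
      (pvStepB maxRow) (pend1, PySem.Dict.empty, ([] : List (Int × Int)))).2.2

-- ===== PRECONDITION & SPEC =====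
-- Pre_: the arguments are Python sets, so the list representing `rolling` carries no duplicate
-- position; and A raises ValueError (max of an empty sequence) when both sets are empty.
def Pre_roll_south (rolling : List (Int × Int)) (obstacles : List (Int × Int)) : Prop :=
  rolling.Nodup ∧ (rolling ≠ [] ∨ obstacles ≠ [])
instance (rolling : List (Int × Int)) (obstacles : List (Int × Int)) : Decidable (Pre_roll_south rolling obstacles) := by unfold Pre_roll_south; infer_instance
def pvWitness_roll_south : (List (Int × Int)) × (List (Int × Int)) := ([(0, 0)], [(2, 0)])

def Spec_roll_south (rolling : List (Int × Int)) (obstacles : List (Int × Int)) (out : List (Int × Int)) : Prop := out = roll_south_alt rolling obstacles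
instance (rolling : List (Int × Int)) (obstacles : List (Int × Int)) (out : List (Int × Int)) : Decidable (Spec_roll_south rolling obstacles out) := by unfold Spec_roll_south; infer_instance

-- ===== CLAIM (what is proved, stated in full; the proofs are below) =====
def Claim_equal_roll_south : Prop := ∀ (rolling : List (Int × Int)) (obstacles : List (Int × Int)), Dom_roll_south rolling obstacles → Pre_roll_south rolling obstacles → Spec_roll_south rolling obstacles (roll_south rolling obstacles)

-- ===== LEMMAS AND PROOFS =====

lemma pvFallA_eq (maxRow : Int) (obstacles rolled : List (Int × Int)) (col row L : Int)
    (h1 : row ≤ L) (h2 : L ≤ maxRow - 1)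
    (h3 : ∀ j, row < j → j ≤ L → (j, col) ∉ obstacles ∧ (j, col) ∉ rolled)
    (h4 : L = maxRow - 1 ∨ (L + 1, col) ∈ obstacles ∨ (L + 1, col) ∈ rolled) :
    pvFallA maxRow obstacles rolled col row = L := by
  have main : ∀ n : Nat, ∀ r : Int, (L - r).toNat = n → r ≤ L →
      (∀ j, r < j → j ≤ L → (j, col) ∉ obstacles ∧ (j, col) ∉ rolled) →
      pvFallA maxRow obstacles rolled col r = L := by
    intro n
    induction n with
    | zero =>
      intro r hn hr _
      have hrL : r = L := by omega
      subst hrL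
      rw [pvFallA]
      split_ifs with hc
      · exfalso
        rcases hc with ⟨hlt, hno, hnr⟩
        rcases h4 with h | h | h
        · omega
        · exact hno h
        · exact hnr h
      · rfl
    | succ n ih =>
      intro r hn hr hfree
      have hrL : r < L := by omega
      rw [pvFallA]
      split_ifs with hc
      · exact ih (r + 1) (by omega) (by omega) (fun j hj hjL => hfree j (by omega) hjL)
      · exfalso
        exact hc ⟨by omega, (hfree (r + 1) (by omega) (by omega)).1,
          (hfree (r + 1) (by omega) (by omega)).2⟩
  exact main (L - row).toNat row rfl h1 h3

lemma pvPop_spec (rows : List Int) (hs : rows.Pairwise (· ≤ ·)) (block row : Int) :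
    (pvPop block rows row).2 = rows.filter (fun v => decide (v ≤ row)) ∧
    (pvPop block rows row).1 ≤ block ∧
    (∀ v ∈ rows, row < v → (pvPop block rows row).1 ≤ v) ∧
    ((pvPop block rows row).1 = block ∨
      ((pvPop block rows row).1 ∈ rows ∧ row < (pvPop block rows row).1)) := by
  induction rows using List.reverseRecOn generalizing block with
  | nil => simp [pvPop]
  | append_singleton init last ih =>
    have hne : init ++ [last] ≠ [] := by simp
    have hlast : (init ++ [last]).getLast hne = last := by simp
    have hdrop : (init ++ [last]).dropLast = init := by simp
    have hinit : init.Pairwise (· ≤ ·) := (List.pairwise_append.mp hs).1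
    have hle : ∀ v ∈ init, v ≤ last := by
      intro v hv
      exact (List.pairwise_append.mp hs).2.2 v hv last (by simp)
    rw [pvPop]
    rw [dif_pos hne]
    simp only [hlast, hdrop]
    split_ifs with hgt
    · -- last > row : recurse
      obtain ⟨hf, hb, hmem, hcase⟩ := ih hinit (min block last)
      refine ⟨?_, ?_, ?_, ?_⟩
      · rw [hf, List.filter_append]
        simp [show ¬ (last ≤ row) by omega]
      · exact le_trans hb (min_le_left _ _)
      · intro v hv hrv
        rcases List.mem_append.mp hv with h | h
        · exact hmem v h hrv
        · simp at h; subst h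
          exact le_trans hb (min_le_right _ _)
      · rcases hcase with h | h
        · rcases min_cases block last with ⟨hmin, _⟩ | ⟨hmin, _⟩
          · left; rw [h, hmin]
          · right; rw [h, hmin]; exact ⟨by simp, hgt⟩
        · right; exact ⟨List.mem_append.mpr (Or.inl h.1), h.2⟩
    · -- last ≤ row : stop
      have hall : ∀ v ∈ init ++ [last], v ≤ row := by
        intro v hv
        rcases List.mem_append.mp hv with h | h
        · exact le_trans (hle v h) (by omega)
        · simp at h; omega
      refine ⟨?_, le_refl _, ?_, Or.inl rfl⟩
      · rw [List.filter_eq_self.mpr]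
        intro v hv; simpa using hall v hv
      · intro v hv hrv; exact absurd (hall v hv) (by omega)

lemma get?_mk_map (f : List Int → List Int) (l : List (Int × List Int)) (c : Int) :
    (PySem.Dict.mk (l.map (fun kv => (kv.1, f kv.2)))).get? c =
      ((PySem.Dict.mk l).get? c).map f := by
  induction l with
  | nil => simp [PySem.Dict.get?]
  | cons kv rest ih =>
    obtain ⟨k, v⟩ := kv
    simp only [List.map_cons, PySem.Dict.get?_mk_cons]
    split_ifs with h
    · simp
    · exact ih

lemma getD_group (l : List (Int × Int)) (d : PySem.Dict Int (List Int)) (c : Int) :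
    (l.foldl (fun d p => d.modify p.2 [] (fun rs => rs ++ [p.1])) d).getD c [] =
      d.getD c [] ++ (l.filter (fun p => p.2 == c)).map (·.1) := by
  induction l generalizing d with
  | nil => simp
  | cons p rest ih =>
    simp only [List.foldl_cons, List.filter_cons]
    rw [ih]
    by_cases h : p.2 = c
    · subst h
      rw [PySem.Dict.getD_modify_self]
      simp
    · rw [PySem.Dict.getD_modify_of_ne _ _ _ (Ne.symm h)]
      simp [h]

lemma main_loop (maxRow : Int) (obstacles : List (Int × Int)) :
    ∀ (S rolledA : List (Int × Int)) (pend : PySem.Dict Int (List Int))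
      (lowest : PySem.Dict Int Int),
    S.Pairwise (fun a b => b.1 ≤ a.1) → S.Nodup →
    (∀ p ∈ S, p.1 ≤ maxRow - 1) →
    (∀ c, (pend.getD c []).Pairwise (· ≤ ·)) →
    (∀ c v, v ∈ pend.getD c [] → (v, c) ∈ obstacles) →
    (∀ v c, (v, c) ∈ obstacles → v ∈ pend.getD c [] ∨ lowest.getD c maxRow < v) →
    (∀ c lo, lowest.get? c = some lo → (lo, c) ∈ rolledA) →
    (∀ sr c, (sr, c) ∈ rolledA → ∃ lo, lowest.get? c = some lo ∧ lo ≤ sr) →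
    (∀ c lo, lowest.get? c = some lo → ∀ p ∈ S, p.2 = c → p.1 < lo) →
    (∀ c lo, lowest.get? c = some lo → lo ≤ maxRow - 1) →
    S.foldl (pvStepA maxRow obstacles) rolledA =
      (S.foldl (pvStepB maxRow) (pend, lowest, rolledA)).2.2 := by
  intro S
  induction S with
  | nil => intro rolledA pend lowest _ _ _ _ _ _ _ _ _ _; rfl
  | cons p S' ih =>
    intro rolledA pend lowest hpair hnodup hI0 hI1 hI2 hI3 hI4 hI5 hI6 hI8
    obtain ⟨r, c⟩ := p
    -- abbreviations
    set rows := pend.getD c [] with hrows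
    set block₀ := lowest.getD c maxRow with hblock₀def
    obtain ⟨hsp_rows, hsp_le, hsp_mem, hsp_case⟩ := pvPop_spec rows (hI1 c) block₀ r
    set b' := (pvPop block₀ rows r).1 with hb'def
    set rows' := (pvPop block₀ rows r).2 with hrows'def
    -- basic bounds
    have hrmax : r ≤ maxRow - 1 := hI0 (r, c) List.mem_cons_self
    have hblock : r < block₀ ∧ block₀ ≤ maxRow := by
      cases hlo : lowest.get? c with
      | none => simp [hblock₀def, PySem.Dict.getD, hlo]; omega
      | some lo =>
        have hb : block₀ = lo := by simp [hblock₀def, PySem.Dict.getD, hlo]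
        constructor
        · rw [hb]; exact hI6 c lo hlo (r, c) List.mem_cons_self rfl
        · rw [hb]; have := hI8 c lo hlo; omega
    have hrb' : r < b' := by
      rcases hsp_case with h | h
      · omega
      · exact h.2
    have hb'max : b' ≤ maxRow := le_trans hsp_le hblock.2
    -- A's while loop lands exactly at b' - 1
    have hfall : pvFallA maxRow obstacles rolledA c r = b' - 1 := by
      apply pvFallA_eq maxRow obstacles rolledA c r (b' - 1) (by omega) (by omega)
      · intro j hj hjL
        constructor
        · intro hin
          rcases hI3 j c hin with hv | hv
          · have := hsp_mem j hv hj; omega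
          · omega
        · intro hin
          obtain ⟨lo, hlo, hlole⟩ := hI5 j c hin
          have hb : block₀ = lo := by simp [hblock₀def, PySem.Dict.getD, hlo]
          omega
      · rcases hsp_case with hbb | ⟨hmem, _⟩
        · cases hlo : lowest.get? c with
          | none =>
            left
            have : block₀ = maxRow := by simp [hblock₀def, PySem.Dict.getD, hlo]
            omega
          | some lo =>
            right; right
            have hb : block₀ = lo := by simp [hblock₀def, PySem.Dict.getD, hlo]
            have : b' - 1 + 1 = lo := by omega
            rw [this]
            exact hI4 c lo hlo
        · right; left
          have : b' - 1 + 1 = b' := by omega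
          rw [this]
          exact hI2 c b' hmem
    -- one step on each side
    rw [List.foldl_cons, List.foldl_cons]
    have hstepA : pvStepA maxRow obstacles rolledA (r, c) = PySem.Set.add rolledA (b' - 1, c) := by
      simp only [pvStepA, hfall]
    have hstepB : pvStepB maxRow (pend, lowest, rolledA) (r, c) =
        (pend.insert c rows', lowest.insert c (b' - 1), PySem.Set.add rolledA (b' - 1, c)) := rfl
    rw [hstepA, hstepB]
    -- invariants for the tail
    have hnd' : (r, c) ∉ S' := (List.nodup_cons.mp hnodup).1
    have hmemR' : ∀ y, y ∈ PySem.Set.add rolledA (b' - 1, c) ↔ y ∈ rolledA ∨ y = (b' - 1, c) :=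
      fun y => PySem.Set.mem_add rolledA (b' - 1, c) y
    apply ih
    · exact hpair.of_cons
    · exact (List.nodup_cons.mp hnodup).2
    · exact fun q hq => hI0 q (List.mem_cons_of_mem _ hq)
    · -- I1
      intro c₂
      by_cases hc : c₂ = c
      · subst hc
        rw [PySem.Dict.getD_insert_self, hsp_rows]
        exact (hI1 c₂).sublist List.filter_sublist
      · rw [PySem.Dict.getD_insert_of_ne _ _ _ hc]
        exact hI1 c₂
    · -- I2
      intro c₂ v hv
      by_cases hc : c₂ = c
      · subst hc
        rw [PySem.Dict.getD_insert_self, hsp_rows] at hv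
        exact hI2 c₂ v (List.mem_of_mem_filter hv)
      · rw [PySem.Dict.getD_insert_of_ne _ _ _ hc] at hv
        exact hI2 c₂ v hv
    · -- I3
      intro v c₂ hin
      by_cases hc : c₂ = c
      · subst hc
        rcases hI3 v c₂ hin with hv | hv
        · by_cases hvr : v ≤ r
          · left
            rw [PySem.Dict.getD_insert_self, hsp_rows]
            exact List.mem_filter.mpr ⟨hv, by simpa using hvr⟩
          · right
            rw [PySem.Dict.getD_insert_self]
            have := hsp_mem v hv (by omega)
            omega
        · right
          rw [PySem.Dict.getD_insert_self]
          omega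
      · rw [PySem.Dict.getD_insert_of_ne _ _ _ hc, PySem.Dict.getD_insert_of_ne _ _ _ hc]
        exact hI3 v c₂ hin
    · -- I4
      intro c₂ lo hget
      by_cases hc : c₂ = c
      · subst hc
        rw [PySem.Dict.get?_insert_self] at hget
        rw [(hmemR' _)]
        right
        simpa using hget.symm
      · rw [PySem.Dict.get?_insert_of_ne _ _ hc] at hget
        rw [(hmemR' _)]
        exact Or.inl (hI4 c₂ lo hget)
    · -- I5
      intro sr c₂ hmem
      rw [(hmemR' _)] at hmem
      rcases hmem with hold | hnew
      · obtain ⟨lo, hlo, hle⟩ := hI5 sr c₂ hold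
        by_cases hc : c₂ = c
        · subst hc
          refine ⟨b' - 1, PySem.Dict.get?_insert_self _ _ _, ?_⟩
          have hb : block₀ = lo := by simp [hblock₀def, PySem.Dict.getD, hlo]
          omega
        · exact ⟨lo, by rw [PySem.Dict.get?_insert_of_ne _ _ hc]; exact hlo, hle⟩
      · have h1 : sr = b' - 1 := congrArg Prod.fst hnew
        have h2 : c₂ = c := congrArg Prod.snd hnew
        subst h2
        exact ⟨b' - 1, PySem.Dict.get?_insert_self _ _ _, by omega⟩
    · -- I6
      intro c₂ lo hget q hq hqc
      by_cases hc : c₂ = c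
      · subst hc
        rw [PySem.Dict.get?_insert_self] at hget
        have hlo : lo = b' - 1 := by simpa using hget.symm
        obtain ⟨q1, q2⟩ := q
        have hqr : q1 ≤ r := (List.pairwise_cons.mp hpair).1 (q1, q2) hq
        have hqe : q1 ≠ r := by
          intro h
          apply hnd'
          have hq2 : (q1, q2) = (r, q2) := by rw [h]
          rw [hq2] at hq
          simp only [] at hqc
          rwa [hqc] at hq
        simp only [] at hqc
        omega
      · rw [PySem.Dict.get?_insert_of_ne _ _ hc] at hget
        exact hI6 c₂ lo hget q (List.mem_cons_of_mem _ hq) hqc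
    · -- I8
      intro c₂ lo hget
      by_cases hc : c₂ = c
      · subst hc
        rw [PySem.Dict.get?_insert_self] at hget
        have : lo = b' - 1 := by simpa using hget.symm
        omega
      · rw [PySem.Dict.get?_insert_of_ne _ _ hc] at hget
        exact hI8 c₂ lo hget

-- ===== VERDICT (by name: the statement is the Claim_ definition above) =====
theorem roll_south_spec : Claim_equal_roll_south := by
  intro rolling obstacles _hdom hpre
  obtain ⟨hnd, -⟩ := hpre
  unfold Spec_roll_south roll_south roll_south_alt
  cases hmx : PySem.List.max? ((PySem.Set.union rolling obstacles).map (fun p => p.1)) (fun r => r) with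
  | none => rfl
  | some mx =>
    simp only []
    -- name the pieces
    set maxRow : Int := mx + 1 with hmR
    set pend0 : PySem.Dict Int (List Int) :=
      obstacles.foldl (fun d p => d.modify p.2 [] (fun rs => rs ++ [p.1])) PySem.Dict.empty with hp0
    set pend1 : PySem.Dict Int (List Int) :=
      PySem.Dict.mk (pend0.items.map (fun kv => (kv.1, PySem.List.sorted kv.2 (fun v => v) false))) with hp1
    have h0 : ∀ c, pend0.getD c [] = (obstacles.filter (fun p => p.2 == c)).map (·.1) := by
      intro c
      have h := getD_group obstacles PySem.Dict.empty c
      rw [hp0, h]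
      simp [PySem.Dict.getD, PySem.Dict.empty, PySem.Dict.get?]
    have hpend : ∀ c, pend1.getD c [] =
        PySem.List.sorted ((obstacles.filter (fun p => p.2 == c)).map (·.1)) (fun v => v) false := by
      intro c
      have h1 : pend1.get? c =
          (pend0.get? c).map (fun rs => PySem.List.sorted rs (fun v => v) false) := by
        rw [hp1]
        exact get?_mk_map _ pend0.items c
      rw [PySem.Dict.getD, h1, ← h0 c, PySem.Dict.getD]
      cases hg : pend0.get? c with
      | none => simp [PySem.List.sorted_eq_nil_iff]
      | some rs => simp
    have hemp : ∀ c : Int, (PySem.Dict.empty : PySem.Dict Int Int).get? c = none := by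
      intro c; simp [PySem.Dict.empty, PySem.Dict.get?]
    apply main_loop maxRow obstacles _ [] pend1 PySem.Dict.empty
    · exact (PySem.List.sorted_pairwise rolling (fun pos => -pos.1)).imp (by intro a b h; omega)
    · exact ((PySem.List.sorted_perm rolling (fun pos => -pos.1) false).nodup_iff).mpr hnd
    · intro p hp
      have hp' : p ∈ rolling := (PySem.List.mem_sorted rolling _ false p).mp hp
      have hu : p ∈ PySem.Set.union rolling obstacles :=
        (PySem.Set.mem_union rolling obstacles p).mpr (Or.inl hp')
      have := PySem.List.max?_isMax hmx p.1 (List.mem_map_of_mem hu)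
      omega
    · intro c
      rw [hpend c]
      exact (PySem.List.sorted_pairwise _ _).imp (fun h => h)
    · intro c v hv
      rw [hpend c] at hv
      have := (PySem.List.mem_sorted _ _ _ v).mp hv
      obtain ⟨p, hpf, hpv⟩ := List.mem_map.mp this
      obtain ⟨hpo, hpc⟩ := List.mem_filter.mp hpf
      have hc : p.2 = c := by simpa using hpc
      have : p = (v, c) := by
        obtain ⟨p1, p2⟩ := p
        simp only [] at hpv hc
        rw [hpv, hc]
      rwa [this] at hpo
    · intro v c hin
      left
      rw [hpend c]
      refine (PySem.List.mem_sorted _ _ _ v).mpr (List.mem_map.mpr ⟨(v, c), ?_, rfl⟩)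
      exact List.mem_filter.mpr ⟨hin, by simp⟩
    · intro c lo hget; rw [hemp c] at hget; cases hget
    · intro sr c hmem; cases hmem
    · intro c lo hget; rw [hemp c] at hget; cases hget
    · intro c lo hget; rw [hemp c] at hget; cases hget
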